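-- pv_equiv track=rewrite | github.com/neroexpress/GitHubRepo | Amne/subranges.py | number_of_increasing_Subranges
-- ===== SOURCE A (Python) =====
-- def number_of_increasing_Subranges(window):
-- 	'''
-- 	This function returns the number of increasing subranges.
-- 	'''
-- 	increasing_subrange = 0
-- 	for j in range(len(window)-1):
-- 		for i in range(len(window)-1):
-- 			new_window = window[j:len(window)-i]
-- 			if len(new_window)<2:continue
-- 			if all(new_window[p] < new_window[p+1] for p in range(len(new_window)-1)):
-- 				increasing_subrange +=1
-- 	return increasing_subrange
-- ===== SOURCE B (Python) =====
-- def number_of_increasing_Subranges(window):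
-- 	'''
-- 	This function returns the number of increasing subranges.
-- 	'''
-- 	total = 0
-- 	run = 1
-- 	for k in range(1, len(window)):
-- 		if window[k-1] < window[k]:
-- 			run += 1
-- 		else:
-- 			total += run * (run - 1) // 2
-- 			run = 1
-- 	total += run * (run - 1) // 2
-- 	return total
-- ===== Notes on version B (the rewrite author's own statement) =====
-- stated objective: faster
-- what changed: Replaced A's O(n^3) enumeration of all (start,end) slice pairs (each checked element-by-element for monotonicity) with a single linear pass that sums run*(run-1)//2 over the lengths of maximal strictly-increasing runs.
import Mathlib
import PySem

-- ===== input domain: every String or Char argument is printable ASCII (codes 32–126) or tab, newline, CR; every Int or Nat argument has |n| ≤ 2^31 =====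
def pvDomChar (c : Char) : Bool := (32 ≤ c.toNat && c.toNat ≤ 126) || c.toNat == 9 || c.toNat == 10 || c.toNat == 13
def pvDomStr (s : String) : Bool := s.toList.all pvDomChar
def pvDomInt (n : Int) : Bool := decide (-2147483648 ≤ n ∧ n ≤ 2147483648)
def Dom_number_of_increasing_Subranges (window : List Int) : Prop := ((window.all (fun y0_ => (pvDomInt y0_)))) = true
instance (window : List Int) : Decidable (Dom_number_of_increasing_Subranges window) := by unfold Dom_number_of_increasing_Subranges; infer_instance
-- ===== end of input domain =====

-- B replaces A's cubic scan over all (start, end) slice pairs by a single pass summing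
-- run*(run-1)//2 over maximal strictly-increasing run lengths.

-- ===== PORT A =====
def number_of_increasing_Subranges (window : List Int) : Int :=
  (PySem.List.pyRange 0 (PySem.List.len window - 1) 1).foldl (fun acc j =>
    (PySem.List.pyRange 0 (PySem.List.len window - 1) 1).foldl (fun acc2 i =>
      let nw := PySem.List.slice window (some j) (some (PySem.List.len window - i))
      if PySem.List.len nw < 2 then acc2
      else if (PySem.List.pyRange 0 (PySem.List.len nw - 1) 1).all
            (fun p => decide (PySem.List.pyGetD nw p 0 < PySem.List.pyGetD nw (p + 1) 0))
      then acc2 + 1 else acc2) acc) 0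

-- ===== PORT B =====
def number_of_increasing_Subranges_alt (window : List Int) : Int :=
  let st := (PySem.List.pyRange 1 (PySem.List.len window) 1).foldl
    (fun (s : Int × Int) k =>
      if PySem.List.pyGetD window (k - 1) 0 < PySem.List.pyGetD window k 0
      then (s.1, s.2 + 1)
      else (s.1 + PySem.Int.floordiv (s.2 * (s.2 - 1)) 2, 1))
    (0, 1)
  st.1 + PySem.Int.floordiv (st.2 * (st.2 - 1)) 2

-- ===== PRECONDITION & SPEC =====
def Spec_number_of_increasing_Subranges (window : List Int) (out : Int) : Prop := out = number_of_increasing_Subranges_alt window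
instance (window : List Int) (out : Int) : Decidable (Spec_number_of_increasing_Subranges window out) := by unfold Spec_number_of_increasing_Subranges; infer_instance

-- ===== CLAIM (what is proved, stated in full; the proofs are below) =====
def Claim_equal_number_of_increasing_Subranges : Prop := ∀ (window : List Int), Dom_number_of_increasing_Subranges window → Spec_number_of_increasing_Subranges window (number_of_increasing_Subranges window)

-- ===== LEMMAS AND PROOFS =====

-- length of the maximal strictly-increasing run of `w` ending at index k
def runLen (w : List Int) : ℕ → ℕ
  | 0 => 1
  | k+1 => if w.getD k 0 < w.getD (k+1) 0 then runLen w k + 1 else 1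

-- common reference value both ports are proved equal to
def SubCnt (w : List Int) (m : ℕ) : ℕ := ∑ k ∈ Finset.range m, (runLen w (k+1) - 1)

-- `w` is strictly increasing between positions j and k
def IncFrom (w : List Int) (j k : ℕ) : Prop :=
  ∀ p, j ≤ p → p < k → w.getD p 0 < w.getD (p+1) 0

def tri : ℕ → ℕ
  | 0 => 0
  | r+1 => tri r + r

lemma runLen_pos (w : List Int) (k : ℕ) : 1 ≤ runLen w k := by
  cases k with
  | zero => simp [runLen]
  | succ k => simp only [runLen]; split <;> omega

lemma runLen_le (w : List Int) (k : ℕ) : runLen w k ≤ k + 1 := by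
  induction k with
  | zero => simp [runLen]
  | succ k ih => simp only [runLen]; split <;> omega

lemma two_tri (r : ℕ) : ((r : Int)) * ((r : Int) - 1) = 2 * (tri r : Int) := by
  induction r with
  | zero => simp [tri]
  | succ r ih => push_cast [tri]; linear_combination ih

lemma floordiv_tri (r : ℕ) :
    PySem.Int.floordiv ((r : Int) * ((r : Int) - 1)) 2 = (tri r : Int) := by
  rw [two_tri, PySem.Int.floordiv_eq_ediv_of_pos (by norm_num)]
  omega

lemma listSum_eq (f : ℕ → Int) (n : ℕ) :
    ((List.range n).map f).sum = ∑ i ∈ Finset.range n, f i := rfl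

lemma B_fold (w : List Int) (m : ℕ) :
    (List.range m).foldl (fun (s : Int × Int) (k : ℕ) =>
        if PySem.List.pyGetD w ((1 + (k : Int)) - 1) 0 < PySem.List.pyGetD w (1 + (k : Int)) 0
        then (s.1, s.2 + 1)
        else (s.1 + PySem.Int.floordiv (s.2 * (s.2 - 1)) 2, 1)) (0, 1)
    = ((SubCnt w m : Int) - (tri (runLen w m) : Int), (runLen w m : Int)) := by
  induction m with
  | zero => simp [SubCnt, runLen, tri]
  | succ m ih =>
    rw [List.range_succ, List.foldl_append, ih]
    have h1 : ((1 : Int) + (m : Int)) - 1 = (m : Int) := by omega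
    have h2 : ((1 : Int) + (m : Int)) = ((m+1 : ℕ) : Int) := by push_cast; omega
    simp only [List.foldl_cons, List.foldl_nil]
    rw [h1, h2]
    simp only [PySem.List.pyGetD_natCast]
    by_cases hc : w.getD m 0 < w.getD (m+1) 0
    · rw [if_pos hc]
      have hr : runLen w (m+1) = runLen w m + 1 := by rw [runLen, if_pos hc]
      have hS : SubCnt w (m+1) = SubCnt w m + (runLen w m + 1 - 1) := by
        simp [SubCnt, Finset.sum_range_succ, hr]
      have := runLen_pos w m
      rw [Prod.mk.injEq]
      constructor <;> simp only [hr, hS, tri] <;> push_cast <;> omega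
    · rw [if_neg hc]
      have hr : runLen w (m+1) = 1 := by rw [runLen, if_neg hc]
      have hS : SubCnt w (m+1) = SubCnt w m := by
        simp [SubCnt, Finset.sum_range_succ, hr]
      rw [floordiv_tri, Prod.mk.injEq]
      constructor <;> simp [hr, hS, tri]

lemma B_eq (w : List Int) :
    number_of_increasing_Subranges_alt w = (SubCnt w (w.length - 1) : Int) := by
  unfold number_of_increasing_Subranges_alt
  rw [PySem.List.len_eq, PySem.List.pyRange_one]
  have : (((w.length : Int)) - 1).toNat = w.length - 1 := by omega
  rw [this, List.foldl_map, B_fold]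
  simp only []
  rw [floordiv_tri]
  omega

lemma IncFrom_iff_run (w : List Int) (j k : ℕ) (hjk : j ≤ k) :
    IncFrom w j k ↔ k - j < runLen w k := by
  induction k with
  | zero =>
    have hj : j = 0 := by omega
    subst hj
    simp only [runLen]
    constructor
    · intro _; omega
    · intro _ p _ hp; omega
  | succ k ih =>
    by_cases hj : j = k + 1
    · subst hj
      constructor
      · intro _; have := runLen_pos w (k+1); omega
      · intro _ p hp hp'; omega
    · have hjk' : j ≤ k := by omega
      have hsplit : IncFrom w j (k+1) ↔ IncFrom w j k ∧ w.getD k 0 < w.getD (k+1) 0 := by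
        constructor
        · intro h
          exact ⟨fun p h1 h2 => h p h1 (by omega), h k hjk' (by omega)⟩
        · rintro ⟨h1, h2⟩ p hp hp'
          rcases Nat.lt_or_ge p k with h | h
          · exact h1 p hp h
          · have : p = k := by omega
            subst this; exact h2
      rw [hsplit]
      by_cases hc : w.getD k 0 < w.getD (k+1) 0
      · rw [runLen, if_pos hc]
        rw [ih hjk']
        constructor
        · rintro ⟨h, _⟩; omega
        · intro h; exact ⟨by omega, hc⟩
      · rw [runLen, if_neg hc]
        constructor
        · rintro ⟨_, h⟩; exact absurd h hc
        · intro h; omega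


lemma allRange_iff (l : List Int) :
    ((PySem.List.pyRange 0 (PySem.List.len l - 1) 1).all
      (fun p => decide (PySem.List.pyGetD l p 0 < PySem.List.pyGetD l (p + 1) 0))) = true
    ↔ ∀ q : ℕ, q + 1 < l.length → l.getD q 0 < l.getD (q+1) 0 := by
  rw [List.all_eq_true]
  constructor
  · intro h q hq
    have hmem : (q : Int) ∈ PySem.List.pyRange 0 (PySem.List.len l - 1) 1 := by
      rw [PySem.List.mem_pyRange_one, PySem.List.len_eq]
      omega
    have := h _ hmem
    rw [decide_eq_true_iff] at this
    have e1 : ((q : Int) + 1) = ((q + 1 : ℕ) : Int) := by push_cast; ring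
    rwa [e1, PySem.List.pyGetD_natCast, PySem.List.pyGetD_natCast] at this
  · intro h p hp
    rw [PySem.List.mem_pyRange_one, PySem.List.len_eq] at hp
    obtain ⟨h0, hlt⟩ := hp
    set q := p.toNat with hq
    have hpq : p = (q : Int) := by omega
    rw [decide_eq_true_iff, hpq]
    have e1 : ((q : Int) + 1) = ((q + 1 : ℕ) : Int) := by push_cast; ring
    rw [e1, PySem.List.pyGetD_natCast, PySem.List.pyGetD_natCast]
    exact h q (by omega)


lemma count_interval (a k m : ℕ) (hkm : k ≤ m) :
    (∑ j ∈ Finset.range m, if a ≤ j ∧ j < k then (1 : Int) else 0) = ((k - a : ℕ) : Int) := by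
  have h1 : ∀ j ∈ Finset.range m, (if a ≤ j ∧ j < k then (1 : Int) else 0)
      = if j ∈ Finset.Ico a k then (1 : Int) else 0 := by
    intro j _; simp [Finset.mem_Ico]
  rw [Finset.sum_congr rfl h1, Finset.sum_ite_mem]
  have h2 : Finset.range m ∩ Finset.Ico a k = Finset.Ico a k := by
    apply Finset.inter_eq_right.mpr
    intro x hx
    rw [Finset.mem_Ico] at hx
    rw [Finset.mem_range]
    omega
  rw [h2, Finset.sum_const, Nat.card_Ico]
  simp

lemma seg_getD (w : List Int) (j m q : ℕ) (hq : q < ((w.drop j).take m).length) :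
    ((w.drop j).take m).getD q 0 = w.getD (j + q) 0 := by
  have hq2 : q < (w.drop j).length := by
    simp only [List.length_take] at hq; omega
  have hq' : j + q < w.length := by
    simp only [List.length_drop] at hq2; omega
  rw [List.getD_eq_getElem _ _ hq, List.getD_eq_getElem _ _ hq']
  rw [List.getElem_take, List.getElem_drop]


lemma inner_branch (w : List Int) (j i : ℕ) (hi : i < w.length - 1) (acc : Int) :
    (let nw := PySem.List.slice w (some (j : Int)) (some (PySem.List.len w - (i : Int)))
     if PySem.List.len nw < 2 then acc
     else if (PySem.List.pyRange 0 (PySem.List.len nw - 1) 1).all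
          (fun p => decide (PySem.List.pyGetD nw p 0 < PySem.List.pyGetD nw (p + 1) 0))
     then acc + 1 else acc)
    = acc + (if (w.length - 1 - i) - (runLen w (w.length - 1 - i) - 1) ≤ j ∧ j < w.length - 1 - i
             then (1 : Int) else 0) := by
  have e : (PySem.List.len w - (i : Int)) = ((w.length - i : ℕ) : Int) := by
    rw [PySem.List.len_eq]; omega
  rw [e, PySem.List.slice_natCast]
  set nw := (w.drop j).take (w.length - i - j) with hnw
  have hlen : nw.length = w.length - i - j := by
    rw [hnw]
    simp only [List.length_take, List.length_drop]
    omega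
  by_cases h2 : w.length - i - j < 2
  · rw [if_pos (by rw [PySem.List.len_eq, hlen]; omega)]
    rw [if_neg (by omega)]
    ring
  · rw [if_neg (by rw [PySem.List.len_eq, hlen]; omega)]
    have key : ((PySem.List.pyRange 0 (PySem.List.len nw - 1) 1).all
          (fun p => decide (PySem.List.pyGetD nw p 0 < PySem.List.pyGetD nw (p + 1) 0))) = true
        ↔ IncFrom w j (w.length - 1 - i) := by
      rw [allRange_iff nw]
      constructor
      · intro h p hjp hpk
        have hq : (p - j) + 1 < nw.length := by rw [hlen]; omega
        have := h (p - j) hq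
        rw [seg_getD w j _ _ (by simp only [List.length_take, List.length_drop]; omega),
            seg_getD w j _ _ (by simp only [List.length_take, List.length_drop]; omega)] at this
        rwa [show j + (p - j) = p from by omega, show j + (p - j + 1) = p + 1 from by omega] at this
      · intro h q hq
        rw [hlen] at hq
        rw [seg_getD w j _ _ (by simp only [List.length_take, List.length_drop]; omega),
            seg_getD w j _ _ (by simp only [List.length_take, List.length_drop]; omega)]
        have := h (j + q) (by omega) (by omega)
        rwa [show j + (q + 1) = j + q + 1 from by omega]
    have hjk : j < w.length - 1 - i := by omega
    have hiff := IncFrom_iff_run w j (w.length - 1 - i) (le_of_lt hjk)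
    have hp := runLen_pos w (w.length - 1 - i)
    by_cases hr : (w.length - 1 - i) - j < runLen w (w.length - 1 - i)
    · rw [if_pos (key.mpr (hiff.mpr hr)), if_pos ⟨by omega, hjk⟩]
    · rw [if_neg (fun hb => hr (hiff.mp (key.mp hb))),
          if_neg (fun hx => hr (by obtain ⟨h1, _⟩ := hx; omega))]
      ring

lemma A_eq (w : List Int) :
    number_of_increasing_Subranges w = (SubCnt w (w.length - 1) : Int) := by
  unfold number_of_increasing_Subranges
  rw [PySem.List.pyRange_zero]
  rw [show (PySem.List.len w - 1).toNat = w.length - 1 from by rw [PySem.List.len_eq]; omega]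
  simp only [List.foldl_map]
  rw [PySem.List.foldl_congr_mem _ _
      (fun (acc : Int) (j : ℕ) => acc + ((List.range (w.length - 1)).map (fun i =>
        if (w.length - 1 - i) - (runLen w (w.length - 1 - i) - 1) ≤ j ∧ j < w.length - 1 - i
        then (1 : Int) else 0)).sum) _
      (by
        intro acc j _
        rw [PySem.List.foldl_congr_mem _ _
            (fun (acc2 : Int) (i : ℕ) => acc2 +
              (if (w.length - 1 - i) - (runLen w (w.length - 1 - i) - 1) ≤ j ∧ j < w.length - 1 - i
               then (1 : Int) else 0)) _
            (by
              intro acc2 i hi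
              rw [List.mem_range] at hi
              exact inner_branch w j i hi acc2)]
        rw [PySem.List.foldl_add])]
  rw [PySem.List.foldl_add, zero_add, listSum_eq]
  simp only [listSum_eq]
  rw [Finset.sum_comm]
  have hmain : ∀ i ∈ Finset.range (w.length - 1),
      (∑ j ∈ Finset.range (w.length - 1),
        if (w.length - 1 - i) - (runLen w (w.length - 1 - i) - 1) ≤ j ∧ j < w.length - 1 - i
        then (1 : Int) else 0)
      = ((runLen w (w.length - 1 - i) - 1 : ℕ) : Int) := by
    intro i hi
    rw [Finset.mem_range] at hi
    have hp := runLen_pos w (w.length - 1 - i)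
    have hl := runLen_le w (w.length - 1 - i)
    rw [count_interval _ _ _ (by omega)]
    congr 1
    omega
  rw [Finset.sum_congr rfl hmain]
  have hrefl := Finset.sum_range_reflect (fun k => ((runLen w (k+1) - 1 : ℕ) : Int)) (w.length - 1)
  have hshift : ∀ i ∈ Finset.range (w.length - 1),
      ((runLen w (w.length - 1 - i) - 1 : ℕ) : Int)
      = ((runLen w ((w.length - 1 - 1 - i) + 1) - 1 : ℕ) : Int) := by
    intro i hi
    rw [Finset.mem_range] at hi
    rw [show w.length - 1 - i = (w.length - 1 - 1 - i) + 1 from by omega]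
  rw [Finset.sum_congr rfl hshift, hrefl, SubCnt, Nat.cast_sum]

-- ===== VERDICT (by name: the statement is the Claim_ definition above) =====
theorem number_of_increasing_Subranges_spec : Claim_equal_number_of_increasing_Subranges := by
  intro w _
  unfold Spec_number_of_increasing_Subranges
  rw [A_eq, B_eq]
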